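-- pv_equiv track=rewrite | github.com/manu3293/CF_Calculator | main.py | calcola_cognome
-- ===== SOURCE A (Python) =====
-- vocali = set('aeiou')
--
-- consonanti = set('bcdfghjklmnpqrstvwxyz')
--
-- def calcola_cognome(cognome):
--     """
--     The function `calcola_cognome` takes a surname as input, removes spaces, extracts the first three
--     consonants or vowels (or 'X' if not enough), and returns them as a string.
--
--     :param cognome: It looks like the code you provided is a function called `calcola_cognome` that
--     takes a surname as input and calculates a shortened version of the surname based on the first three
--     consonants or vowels in the surname. If there are not enough consonants or vowels in the surname, it
--     uses
--     :return: The function `calcola_cognome` returns a string of the first three consonants or vowels (in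
--     order of appearance) from the input `cognome` after removing any spaces. If there are not enough
--     consonants or vowels in the input, 'X' is used to fill the remaining characters to make a total of
--     three characters.
--     """
--     cognome = cognome.replace(' ', '')
--     lettere_cognome = ''
--     vocali_cognome = [
--         lettera for lettera in cognome if lettera.lower() in vocali]
--     consonanti_cognome = [
--         lettera for lettera in cognome if lettera.lower() in consonanti]
--     while len(lettere_cognome) < 3:
--         if consonanti_cognome:
--             lettere_cognome += consonanti_cognome.pop(0)
--         elif vocali_cognome:
--             lettere_cognome += vocali_cognome.pop(0)
--         else:
--             lettere_cognome += 'X'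
--     return lettere_cognome
-- ===== SOURCE B (Python) =====
-- vocali = set('aeiou')
--
-- consonanti = set('bcdfghjklmnpqrstvwxyz')
--
-- def calcola_cognome(cognome):
--     s = cognome.replace(' ', '')
--     cons = ''.join(c for c in s if c.lower() in consonanti)
--     voc = ''.join(c for c in s if c.lower() in vocali)
--     return (cons + voc + 'XXX')[:3]
-- ===== Notes on version B (the rewrite author's own statement) =====
-- stated objective: simpler
-- what changed: Replaces the while/pop(0) accumulator loop with a closed-form expression: classify once into consonant and vowel strings, then concatenate, pad with X characters and slice to three.
import Mathlib
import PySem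

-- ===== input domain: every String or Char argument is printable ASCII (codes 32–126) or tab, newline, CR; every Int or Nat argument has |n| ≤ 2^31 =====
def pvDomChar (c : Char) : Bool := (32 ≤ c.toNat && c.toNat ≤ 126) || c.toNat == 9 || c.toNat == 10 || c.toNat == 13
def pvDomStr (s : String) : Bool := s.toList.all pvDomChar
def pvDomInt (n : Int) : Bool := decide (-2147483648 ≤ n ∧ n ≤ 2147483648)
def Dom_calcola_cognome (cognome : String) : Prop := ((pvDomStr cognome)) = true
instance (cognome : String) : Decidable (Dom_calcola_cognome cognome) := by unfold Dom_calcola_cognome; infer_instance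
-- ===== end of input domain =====

-- B replaces A's while/pop(0) loop by a closed-form concat+pad+slice; objective: simpler.

-- module constants (Python sets 'vocali', 'consonanti')
def vocali : List Char := PySem.Set.ofList "aeiou".toList
def consonanti : List Char := PySem.Set.ofList "bcdfghjklmnpqrstvwxyz".toList

-- ===== PORT A =====
-- the while-loop: runs while len(acc) < 3; acc grows by exactly one char each iteration,
-- so fuel = 3 - |acc| iterations is exact
def loopA : Nat → List Char → List Char → List Char → List Char
  | 0, acc, _, _ => acc
  | n + 1, acc, cons, voc =>
    match cons with
    | c :: cs => loopA n (acc ++ [c]) cs voc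
    | [] =>
      match voc with
      | v :: vs => loopA n (acc ++ [v]) [] vs
      | [] => loopA n (acc ++ ['X']) [] []

def calcola_cognome (cognome : String) : String :=
  let s := (PySem.Str.replace cognome " " "").toList
  let vocali_cognome := s.filter (fun lettera => vocali.contains (PySem.Chars.lowerChar lettera))
  let consonanti_cognome := s.filter (fun lettera => consonanti.contains (PySem.Chars.lowerChar lettera))
  String.ofList (loopA 3 [] consonanti_cognome vocali_cognome)

-- ===== PORT B =====
def calcola_cognome_alt (cognome : String) : String :=
  let s := (PySem.Str.replace cognome " " "").toList
  let cons := s.filter (fun c => consonanti.contains (PySem.Chars.lowerChar c))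
  let voc := s.filter (fun c => vocali.contains (PySem.Chars.lowerChar c))
  String.ofList ((cons ++ voc ++ "XXX".toList).take 3)

-- ===== PRECONDITION & SPEC =====
def Spec_calcola_cognome (cognome : String) (out : String) : Prop := out = calcola_cognome_alt cognome
instance (cognome : String) (out : String) : Decidable (Spec_calcola_cognome cognome out) := by unfold Spec_calcola_cognome; infer_instance

-- ===== CLAIM (what is proved, stated in full; the proofs are below) =====
def Claim_equal_calcola_cognome : Prop := ∀ (cognome : String), Dom_calcola_cognome cognome → Spec_calcola_cognome cognome (calcola_cognome cognome)

-- ===== LEMMAS AND PROOFS =====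

lemma take_append_replicate_succ (l : List Char) (n : Nat) :
    (l ++ List.replicate (n + 1) 'X').take n = (l ++ List.replicate n 'X').take n := by
  rw [List.replicate_succ', ← List.append_assoc,
    List.take_append_of_le_length (by simp)]

lemma loopA_eq (n : Nat) : ∀ (acc cons voc : List Char),
    loopA n acc cons voc = acc ++ (cons ++ voc ++ List.replicate n 'X').take n := by
  induction n with
  | zero => intro acc cons voc; simp [loopA]
  | succ n ih =>
    intro acc cons voc
    match cons with
    | c :: cs =>
      rw [loopA, ih]
      have h : (cs ++ (voc ++ List.replicate (n + 1) 'X')).take n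
          = (cs ++ voc ++ List.replicate n 'X').take n := by
        rw [← List.append_assoc, take_append_replicate_succ]
      simp [h]
    | [] =>
      match voc with
      | v :: vs =>
        rw [loopA, ih]
        simp [take_append_replicate_succ vs n]
      | [] =>
        rw [loopA, ih]
        simp [List.replicate_succ]

-- ===== VERDICT (by name: the statement is the Claim_ definition above) =====
theorem calcola_cognome_spec : Claim_equal_calcola_cognome := by
  intro cognome _
  unfold Spec_calcola_cognome calcola_cognome calcola_cognome_alt
  have hx : List.replicate 3 'X' = "XXX".toList := by decide
  simp only [loopA_eq, hx, List.nil_append]
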